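-- pv_equiv track=rewrite | github.com/lionel-prats/programacion1 | ENTREGAS/stark/05/biblioteca_stark_05.py | calcular_cantidad_tipo
-- ===== SOURCE A (Python) =====
-- def capitalizar_palabras(string: str):
--   """
--   """
--   lista_string = string.split(" ")
--   lista_string = " ".join(list(map(str.capitalize, lista_string)))
--   return lista_string
--
-- def calcular_cantidad_tipo(lista_heroes: list[dict], clave: str) -> dict:
--   """
--   retorna un diccionario con los distintos valores del tipo de dato recibido por parámetro y la cantidad de cada uno\n
--   [lista_heroes: list[dict]] listado de heroes\n
--   [clave: str] campo a procesar\n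
--   return bool|dict -> False si la lista de heroes recibida esta vacia|diccionario resultante
--   """
--   if not lista_heroes:
--     return {"Error": "La lista se encuentra vacía"}
--   diccionario_resultante = {}
--   for heroe in lista_heroes:
--       nueva_clave = capitalizar_palabras(heroe.get(clave, "No Tiene"))
--       if not nueva_clave:
--         nueva_clave = "No Tiene"
--       diccionario_resultante[nueva_clave] = diccionario_resultante.get(nueva_clave, 0) + 1
--   claves_ordenadas = sorted(diccionario_resultante.keys()) # lista de las claves del diccionario, ordenadas alfabeticamente
--   diccionario_resultante = {key: diccionario_resultante[key] for key in claves_ordenadas}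
--   return diccionario_resultante
-- ===== SOURCE B (Python) =====
-- def capitalizar_palabras(string: str):
--   lista_string = string.split(" ")
--   lista_string = " ".join(list(map(str.capitalize, lista_string)))
--   return lista_string
--
-- def _normalizar(heroe: dict, clave: str) -> str:
--   valor = capitalizar_palabras(heroe.get(clave, "No Tiene"))
--   return valor if valor else "No Tiene"
--
-- def calcular_cantidad_tipo(lista_heroes: list[dict], clave: str) -> dict:
--   if not lista_heroes:
--     return {"Error": "La lista se encuentra vacía"}
--   valores = sorted(_normalizar(heroe, clave) for heroe in lista_heroes)
--   pares = []
--   actual = valores[0]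
--   cantidad = 0
--   for valor in valores:
--     if valor == actual:
--       cantidad += 1
--     else:
--       pares.append((actual, cantidad))
--       actual = valor
--       cantidad = 1
--   pares.append((actual, cantidad))
--   return dict(pares)
-- ===== Notes on version B (the rewrite author's own statement) =====
-- stated objective: alternative
-- what changed: Instead of building a count dictionary over the heroes and then re-sorting and re-indexing its keys, B normalizes all values into one list, sorts it, and emits (value, run length) pairs in a single run-length scan over the sorted list.
import Mathlib
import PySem

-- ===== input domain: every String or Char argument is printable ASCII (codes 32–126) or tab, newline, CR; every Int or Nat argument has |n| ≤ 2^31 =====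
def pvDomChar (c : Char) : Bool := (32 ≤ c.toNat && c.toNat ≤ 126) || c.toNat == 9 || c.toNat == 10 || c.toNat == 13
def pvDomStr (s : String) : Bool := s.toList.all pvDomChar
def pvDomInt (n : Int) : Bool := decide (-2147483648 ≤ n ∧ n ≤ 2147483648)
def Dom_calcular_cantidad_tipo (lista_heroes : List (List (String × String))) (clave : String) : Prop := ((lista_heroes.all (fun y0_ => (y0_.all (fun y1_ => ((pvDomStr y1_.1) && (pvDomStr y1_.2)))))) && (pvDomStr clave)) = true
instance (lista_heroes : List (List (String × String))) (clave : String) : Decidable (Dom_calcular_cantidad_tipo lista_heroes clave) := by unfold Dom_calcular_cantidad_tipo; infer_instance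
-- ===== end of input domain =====

-- B replaces A's count-dictionary-then-sort-keys-then-rebuild scheme by sort-all-normalized-values
-- then one run-length scan over the sorted list (objective: alternative, same asymptotic cost).

-- ===== PORT A =====
-- shared module helper: string.split(" "), str.capitalize on each word, " ".join
-- str.capitalize = first char title-cased, rest lowercased; exact on the ASCII domain via upperChar/lower
def capitalizar_palabras (string : String) : String :=
  let lista_string := PySem.Chars.splitOn string.toList [' ']
  PySem.Str.join " " (lista_string.map (fun w =>
    String.ofList (match w with
      | [] => []
      | c :: t => PySem.Chars.upperChar c :: PySem.Chars.lower t)))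

def calcular_cantidad_tipo (lista_heroes : List (List (String × String))) (clave : String) : List (String × Int) :=
  -- A's empty-list branch returns {"Error": <string>}, which is not a List (String × Int); outside Pre_
  if lista_heroes = [] then []
  else
    let diccionario_resultante := lista_heroes.foldl (fun d heroe =>
      let nueva_clave := capitalizar_palabras ((PySem.Dict.mk heroe).getD clave "No Tiene")
      let nueva_clave := if nueva_clave = "" then "No Tiene" else nueva_clave
      d.insert nueva_clave (d.getD nueva_clave 0 + 1)) PySem.Dict.empty
    let claves_ordenadas := PySem.List.sorted diccionario_resultante.keys (fun x => x) false
    -- {key: diccionario_resultante[key] for key in claves_ordenadas}; key is always present, so d[key] = getD key 0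
    (claves_ordenadas.foldl (fun r key => r.insert key (diccionario_resultante.getD key 0)) PySem.Dict.empty).items

-- ===== PORT B =====
def normalizar (heroe : List (String × String)) (clave : String) : String :=
  let valor := capitalizar_palabras ((PySem.Dict.mk heroe).getD clave "No Tiene")
  if valor = "" then "No Tiene" else valor

def calcular_cantidad_tipo_alt (lista_heroes : List (List (String × String))) (clave : String) : List (String × Int) :=
  -- same empty-list guard as A; its error dict is not a List (String × Int); outside Pre_
  if lista_heroes = [] then []
  else
    let valores := PySem.List.sorted (lista_heroes.map (fun heroe => normalizar heroe clave)) (fun x => x) false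
    let actual0 := PySem.List.pyGetD valores 0 ""   -- valores[0]; valores ≠ [] here
    let st := valores.foldl (fun (st : List (String × Int) × String × Int) valor =>
        if valor = st.2.1 then (st.1, st.2.1, st.2.2 + 1)
        else (st.1 ++ [(st.2.1, st.2.2)], valor, 1)) ([], actual0, 0)
    (PySem.Dict.ofList (st.1 ++ [(st.2.1, st.2.2)])).items

-- ===== PRECONDITION & SPEC =====
-- Pre_ excludes only the empty hero list, on which A returns {"Error": "La lista se encuentra vacía"} —
-- a str-valued dict, not a value of the declared dict[str,int] result type (B returns the same dict there).
def Pre_calcular_cantidad_tipo (lista_heroes : List (List (String × String))) (_clave : String) : Prop :=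
  lista_heroes ≠ []
instance (lista_heroes : List (List (String × String))) (clave : String) : Decidable (Pre_calcular_cantidad_tipo lista_heroes clave) := by unfold Pre_calcular_cantidad_tipo; infer_instance

def pvWitness_calcular_cantidad_tipo : (List (List (String × String))) × String :=
  ([[("tipo", "mago oscuro")], [("tipo", "MAGO Oscuro")], []], "tipo")

def Spec_calcular_cantidad_tipo (lista_heroes : List (List (String × String))) (clave : String) (out : List (String × Int)) : Prop := out = calcular_cantidad_tipo_alt lista_heroes clave
instance (lista_heroes : List (List (String × String))) (clave : String) (out : List (String × Int)) : Decidable (Spec_calcular_cantidad_tipo lista_heroes clave out) := by unfold Spec_calcular_cantidad_tipo; infer_instance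

-- ===== CLAIM (what is proved, stated in full; the proofs are below) =====
def Claim_equal_calcular_cantidad_tipo : Prop := ∀ (lista_heroes : List (List (String × String))) (clave : String), Dom_calcular_cantidad_tipo lista_heroes clave → Pre_calcular_cantidad_tipo lista_heroes clave → Spec_calcular_cantidad_tipo lista_heroes clave (calcular_cantidad_tipo lista_heroes clave)

-- ===== LEMMAS AND PROOFS =====

-- B's loop body, named for the proofs (definitionally the lambda in the port)
def pvStep (st : List (String × Int) × String × Int) (valor : String) : List (String × Int) × String × Int :=
  if valor = st.2.1 then (st.1, st.2.1, st.2.2 + 1)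
  else (st.1 ++ [(st.2.1, st.2.2)], valor, 1)

-- the finished pair list B's loop produces from start state ([], a, c) on input s
def pvFinal (a : String) (c : Int) (s : List String) : List (String × Int) :=
  let st := s.foldl pvStep ([], a, c)
  st.1 ++ [st.2]

-- canonical run-length form: first key with its total count, recurse on the rest
def pvCanon (s : List String) : List (String × Int) :=
  match s with
  | [] => []
  | x :: t => (x, 1 + (t.count x : Int)) :: pvCanon (t.filter (fun y => y ≠ x))
  termination_by s.length
  decreasing_by
    have h1 := List.length_filter_le (fun y => decide (y.val ≠ x)) t.attach
    simp at h1 ⊢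
    omega

theorem pvUnattach (t : List String) (x : String) :
    (List.filter (fun x_1 : {y // y ∈ t} =>
            match x_1 with
            | ⟨y, _⟩ => decide (y ≠ x))
          t.attach).unattach = t.filter (fun y => y ≠ x) := by
  rw [List.unattach_filter (g := fun y => decide (y ≠ x)) (hf := fun a h => rfl), List.unattach_attach]

theorem pvCanon_nil : pvCanon [] = [] := by rw [pvCanon]

theorem pvCanon_cons (x : String) (t : List String) :
    pvCanon (x :: t) = (x, 1 + (t.count x : Int)) :: pvCanon (t.filter (fun y => y ≠ x)) := by
  rw [pvCanon]

theorem pvStep_acc (s : List String) (acc : List (String × Int)) (a : String) (c : Int) :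
    s.foldl pvStep (acc, a, c) =
      (acc ++ (s.foldl pvStep ([], a, c)).1, (s.foldl pvStep ([], a, c)).2) := by
  induction s generalizing acc a c with
  | nil => simp
  | cons v t ih =>
    by_cases h : v = a
    · simp only [List.foldl_cons, pvStep, if_pos h]
      exact ih acc a (c + 1)
    · simp only [List.foldl_cons, pvStep, if_neg h, List.nil_append]
      rw [ih (acc ++ [(a, c)]) v 1, ih [(a, c)] v 1]
      simp

theorem pvFinal_eq (s : List String) (a : String) (c : Int)
    (hs : s.Pairwise (· ≤ ·)) (ha : ∀ x ∈ s, a ≤ x) :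
    pvFinal a c s = (a, c + (s.count a : Int)) :: pvCanon (s.filter (fun y => y ≠ a)) := by
  induction s generalizing a c with
  | nil => simp [pvFinal, pvCanon_nil]
  | cons v t ih =>
    rcases List.pairwise_cons.mp hs with ⟨hvt, ht⟩
    by_cases h : v = a
    · subst h
      have : pvFinal v c (v :: t) = pvFinal v (c + 1) t := by
        simp [pvFinal, pvStep]
      rw [this, ih v (c + 1) ht (fun x hx => hvt x hx)]
      simp only [List.count_cons_self, List.filter_cons]
      have : (decide ¬(v = v)) = false := by simp
      rw [this]
      push_cast
      ring_nf
    · have hav : a < v := lt_of_le_of_ne (ha v (List.mem_cons_self)) (fun e => h e.symm)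
      have hne : ∀ x ∈ v :: t, x ≠ a := by
        intro x hx
        rcases List.mem_cons.mp hx with rfl | hx
        · exact fun e => absurd e.symm (ne_of_lt hav)
        · exact fun e => absurd (e ▸ hvt x hx) (not_le_of_gt hav)
      have hsplit : pvFinal a c (v :: t) = (a, c) :: pvFinal v 1 t := by
        simp only [pvFinal, List.foldl_cons, pvStep, if_neg h, List.nil_append]
        rw [pvStep_acc t [(a, c)] v 1]
        simp
      rw [hsplit, ih v 1 ht (fun x hx => hvt x hx)]
      have hcnt : (v :: t).count a = 0 :=
        List.count_eq_zero.mpr (fun hmem => (hne a hmem) rfl)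
      have hfil : (v :: t).filter (fun y => y ≠ a) = v :: t :=
        List.filter_eq_self.mpr (fun x hx => by simpa using hne x hx)
      rw [hcnt, hfil]
      rw [pvCanon_cons]
      simp

theorem pvCanon_keys_mem (s : List String) (k : String) :
    k ∈ (pvCanon s).map Prod.fst ↔ k ∈ s := by
  fun_induction pvCanon s with
  | case1 => simp
  | case2 x t ih =>
    rw [pvUnattach] at ih
    simp only [List.map_cons, List.mem_cons, ih, List.mem_filter]
    by_cases e : k = x <;> simp [e]

theorem pvCanon_keys_lt (s : List String) (hs : s.Pairwise (· ≤ ·)) :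
    ((pvCanon s).map Prod.fst).Pairwise (· < ·) := by
  fun_induction pvCanon s with
  | case1 => simp
  | case2 x t ih =>
    rcases List.pairwise_cons.mp hs with ⟨hxt, ht⟩
    rw [pvUnattach] at ih
    simp only [List.map_cons, List.pairwise_cons]
    refine ⟨?_, ih (ht.filter _)⟩
    intro k hk
    have hkf : k ∈ t.filter (fun y => y ≠ x) := (pvCanon_keys_mem _ k).mp hk
    rcases List.mem_filter.mp hkf with ⟨hkt, hne⟩
    exact lt_of_le_of_ne (hxt k hkt) (fun e => by simp [← e] at hne)

theorem pvCanon_eq_map (s : List String) :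
    pvCanon s = ((pvCanon s).map Prod.fst).map (fun k => (k, (s.count k : Int))) := by
  fun_induction pvCanon s with
  | case1 => simp
  | case2 x t ih =>
    rw [pvUnattach] at ih
    simp only [List.map_cons, List.count_cons_self]
    refine List.cons_eq_cons.mpr ⟨by simp; omega, ?_⟩
    conv_lhs => rw [ih]
    apply List.map_congr_left
    intro k hk
    have hkf : k ∈ t.filter (fun y => y ≠ x) := (pvCanon_keys_mem _ k).mp hk
    rcases List.mem_filter.mp hkf with ⟨hkt, hne⟩
    have hne' : k ≠ x := by simpa using hne
    simp [List.count_filter, hne', Ne.symm hne']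

-- ===== VERDICT (by name: the statement is the Claim_ definition above) =====
theorem calcular_cantidad_tipo_spec : Claim_equal_calcular_cantidad_tipo := by
  intro l clave _ hPre
  unfold Spec_calcular_cantidad_tipo calcular_cantidad_tipo calcular_cantidad_tipo_alt
  rw [if_neg hPre, if_neg hPre]
  simp only []
  set f : List (String × String) → String := fun h => normalizar h clave with hf
  set vals : List String := l.map f with hvals
  -- A's counting loop is Counter(vals)
  have hA : l.foldl (fun d heroe =>
      let nueva_clave := capitalizar_palabras ((PySem.Dict.mk heroe).getD clave "No Tiene")
      let nueva_clave := if nueva_clave = "" then "No Tiene" else nueva_clave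
      d.insert nueva_clave (d.getD nueva_clave 0 + 1)) PySem.Dict.empty
      = PySem.Dict.counter vals := by
    rw [← PySem.Dict.foldl_insert_getD_add_one_eq_counter, hvals, List.foldl_map]
    rfl
  rw [hA, PySem.Dict.keys_counter]
  set claves : List String := PySem.List.sorted (PySem.Set.ofList vals) (fun x => x) false with hclaves
  have hnodupClaves : claves.Nodup :=
    ((PySem.List.sorted_perm _ _ _).nodup_iff).mpr (PySem.Set.nodup_ofList vals)
  -- A's rebuild loop: items over fresh distinct keys
  have hAres : (claves.foldl (fun r key => r.insert key ((PySem.Dict.counter vals).getD key 0)) PySem.Dict.empty).items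
      = claves.map (fun k => (k, (vals.count k : Int))) := by
    rw [PySem.Dict.items_foldl_insert_fresh claves (fun k => k)
      (fun k => (PySem.Dict.counter vals).getD k 0) PySem.Dict.empty
      (fun a _ => PySem.Dict.contains_empty _) (by simpa using hnodupClaves)]
    simp [PySem.Dict.getD_counter]
    rfl
  rw [hAres]
  -- B side
  have hvalsne : vals ≠ [] := by
    rw [hvals]
    intro h
    exact hPre (List.map_eq_nil_iff.mp h)
  set valores : List String := PySem.List.sorted vals (fun x => x) false with hvalores
  have hvne : valores ≠ [] := by
    rw [hvalores, Ne, PySem.List.sorted_eq_nil_iff]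
    exact hvalsne
  obtain ⟨v, t, hvt⟩ := List.exists_cons_of_ne_nil hvne
  have hsortedv : valores.Pairwise (· ≤ ·) := by
    simpa using PySem.List.sorted_pairwise vals (fun x => x)
  -- B's loop produces pvCanon valores
  have hstep : (fun (st : List (String × Int) × String × Int) valor =>
      if valor = st.2.1 then (st.1, st.2.1, st.2.2 + 1)
      else (st.1 ++ [(st.2.1, st.2.2)], valor, 1)) = pvStep := rfl
  have hhead : PySem.List.pyGetD valores 0 "" = v := by
    rw [hvt]; exact PySem.List.pyGetD_zero_cons v t ""
  have hBfold : (valores.foldl pvStep ([], PySem.List.pyGetD valores 0 "", 0)).1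
      ++ [(valores.foldl pvStep ([], PySem.List.pyGetD valores 0 "", 0)).2] = pvCanon valores := by
    rw [hhead]
    have hle : ∀ x ∈ valores, v ≤ x := by
      intro x hx
      rcases List.mem_cons.mp (hvt ▸ hx) with rfl | hx'
      · exact le_refl x
      · exact (List.pairwise_cons.mp (hvt ▸ hsortedv)).1 x hx'
    have := pvFinal_eq valores v 0 hsortedv hle
    rw [pvFinal] at this
    rw [this, hvt]
    simp only [List.count_cons_self, List.filter_cons]
    have hdv : (decide ¬(v = v)) = false := by simp
    rw [hdv, pvCanon_cons]
    push_cast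
    simp [add_comm]
  -- keys of pvCanon valores are exactly claves
  have hkeys : (pvCanon valores).map Prod.fst = claves := by
    rw [hclaves]
    symm
    apply PySem.List.sorted_eq_of_perm_of_pairwise_lt
    · rw [List.perm_ext_iff_of_nodup
        (((pvCanon_keys_lt valores hsortedv).imp (fun h => ne_of_lt h)))
        (PySem.Set.nodup_ofList vals)]
      intro k
      rw [pvCanon_keys_mem, PySem.Set.mem_ofList, hvalores, PySem.List.mem_sorted]
    · simpa using pvCanon_keys_lt valores hsortedv
  have hcounts : ∀ k, valores.count k = vals.count k := fun k =>
    (PySem.List.sorted_perm vals (fun x => x) false).count_eq k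
  have hcanon : pvCanon valores = claves.map (fun k => (k, (vals.count k : Int))) := by
    rw [pvCanon_eq_map, hkeys]
    exact List.map_congr_left (fun k _ => by rw [hcounts k])
  -- B's final dict over fresh distinct keys returns its pair list unchanged
  rw [hstep, hBfold, hcanon]
  have : PySem.Dict.ofList (claves.map (fun k => (k, (vals.count k : Int))))
      = (claves.map (fun k => (k, (vals.count k : Int)))).foldl
          (fun d p => d.insert p.1 p.2) PySem.Dict.empty := rfl
  rw [this, PySem.Dict.items_foldl_insert_fresh _ Prod.fst Prod.snd PySem.Dict.empty
    (fun a _ => PySem.Dict.contains_empty _) (by simpa [Function.comp_def] using hnodupClaves)]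
  have hempty : (PySem.Dict.empty : PySem.Dict String Int).items = [] := rfl
  simp [Function.comp_def, hempty]
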